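-- pv_equiv track=rewrite | github.com/zimmmermann-kogadeeva-group/GEMsembler | Scripts/selection.py | checkManyToOne
-- ===== SOURCE A (Python) =====
-- def checkManyToOne(model_types: [str], to_one: dict):
--     one_to_one = {}
--     many_to_one = {}
--     for typ in model_types:
--         reversed_to_one = {bigg_id[1]: [] for bigg_id in to_one.get(typ).values()}
--         for (k, v) in to_one.get(typ).items(): reversed_to_one[v[1]].append(k)
--         one_to_one.update(
--             {typ: {orig_ids[0]: [to_one.get(typ).get(orig_ids[0])[0], conv_id] for conv_id, orig_ids in
--                    reversed_to_one.items() if len(orig_ids) == 1}})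
--         many_to_one.update({typ: {}})
--         for value in reversed_to_one.values():
--             if len(value) > 1:
--                 for val in value:
--                     many_to_one.get(typ).update({val: to_one.get(typ).get(val)})
--     return one_to_one, many_to_one
-- ===== SOURCE B (Python) =====
-- def checkManyToOne(model_types: [str], to_one: dict):
--     def classify(items):
--         counts = {}
--         for _, v in items:
--             counts[v[1]] = counts.get(v[1], 0) + 1
--         one = [(k, [v[0], v[1]]) for k, v in items if counts[v[1]] == 1]
--         order = list(dict.fromkeys(v[1] for _, v in items))
--         many = [(k, v) for cid in order if counts[cid] > 1
--                        for k, v in items if v[1] == cid]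
--         return dict(one), dict(many)
--     pairs = [(typ, classify(list(to_one.get(typ).items())))
--              for typ in dict.fromkeys(model_types)]
--     return {t: r[0] for t, r in pairs}, {t: r[1] for t, r in pairs}
-- ===== Notes on version B (the rewrite author's own statement) =====
-- stated objective: alternative
-- what changed: Replaces A's dict-of-dicts state machine (a list-valued reverse index per type, re-iterated group by group, with both result dicts threaded through the loop) by a per-type classify helper - a frequency count of converted ids, one filtered pass for one_to_one, and a flatMap over the deduped converted ids for many_to_one - mapped over the deduped type list, reproducing A's insertion orders exactly.
-- outside the precondition, e.g. on checkManyToOne(['m'], {'m': {'a': ['x', 'c'], 'k': ['y']}}): A raises IndexError, B raises IndexError; on checkManyToOne(['m'], {}): A raises AttributeError, B raises AttributeError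
import Mathlib
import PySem

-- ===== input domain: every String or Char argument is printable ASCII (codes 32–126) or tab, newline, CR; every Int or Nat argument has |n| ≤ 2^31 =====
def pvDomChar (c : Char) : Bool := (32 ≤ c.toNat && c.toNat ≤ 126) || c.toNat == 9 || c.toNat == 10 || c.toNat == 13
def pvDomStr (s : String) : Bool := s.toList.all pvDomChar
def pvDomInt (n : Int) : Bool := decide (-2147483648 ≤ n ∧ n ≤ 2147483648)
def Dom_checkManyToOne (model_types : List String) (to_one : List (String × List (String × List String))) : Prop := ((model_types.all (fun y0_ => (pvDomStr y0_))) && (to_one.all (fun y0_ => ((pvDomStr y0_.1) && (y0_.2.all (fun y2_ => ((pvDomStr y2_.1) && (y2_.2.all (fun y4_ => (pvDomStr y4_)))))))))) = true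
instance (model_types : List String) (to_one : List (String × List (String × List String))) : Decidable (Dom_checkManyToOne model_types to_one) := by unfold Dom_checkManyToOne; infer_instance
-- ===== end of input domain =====

-- B replaces A's dict-of-dicts state machine (a reverse index of key lists per type, re-iterated
-- group by group, with both result dicts threaded through the loop) by a per-type classify helper —
-- a frequency count, one filtered pass for one_to_one, and a flatMap over the deduped converted ids
-- for many_to_one — mapped over the deduped type list; return values proved equal on Pre_ (not faster).

-- ===== PORT A =====
-- dicts are PySem.Dict values built from the association lists (lookup = first match)
def checkManyToOne (model_types : List String) (to_one : List (String × List (String × List String))) : (List (String × List (String × List String))) × (List (String × List (String × List String))) :=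
  let toOne : PySem.Dict String (PySem.Dict String (List String)) :=
    PySem.Dict.mk (to_one.map (fun p => (p.1, PySem.Dict.mk p.2)))
  let res := model_types.foldl
    (fun (st : PySem.Dict String (PySem.Dict String (List String)) ×
               PySem.Dict String (PySem.Dict String (List String))) typ =>
      let d := toOne.getD typ (PySem.Dict.mk [])
      -- reversed_to_one = {bigg_id[1]: [] for bigg_id in to_one.get(typ).values()}
      let rev0 := d.values.foldl (fun r bigg => r.insert (PySem.List.pyGetD bigg 1 "") [])
        (PySem.Dict.mk ([] : List (String × List String)))
      -- for (k, v) in to_one.get(typ).items(): reversed_to_one[v[1]].append(k)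
      -- (the key v[1] is always present, so Dict.modify's default [] is never used)
      let rev := d.items.foldl
        (fun r p => r.modify (PySem.List.pyGetD p.2 1 "") [] (fun xs => xs ++ [p.1])) rev0
      -- one_to_one.update({typ: {orig_ids[0]: [to_one.get(typ).get(orig_ids[0])[0], conv_id] ...}})
      let one := st.1.insert typ (rev.items.foldl (fun a q =>
          if q.2.length == 1 then
            a.insert (PySem.List.pyGetD q.2 0 "")
              [PySem.List.pyGetD (d.getD (PySem.List.pyGetD q.2 0 "") []) 0 "", q.1]
          else a) (PySem.Dict.mk []))
      -- many_to_one.update({typ: {}}) ; for value in reversed_to_one.values(): if len(value) > 1: ...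
      let many := rev.values.foldl (fun m value =>
          if 1 < value.length then
            value.foldl (fun m' val =>
              m'.insert typ ((m'.getD typ (PySem.Dict.mk [])).insert val (d.getD val []))) m
          else m) (st.2.insert typ (PySem.Dict.mk []))
      (one, many))
    (PySem.Dict.mk [], PySem.Dict.mk [])
  (res.1.items.map (fun p => (p.1, p.2.items)), res.2.items.map (fun p => (p.1, p.2.items)))

-- ===== PORT B =====
-- dict(pairs) ported as a fold of inserts (exact: overwrite keeps position, new keys append)
def cmtoAltDict (xs : List (String × List String)) : List (String × List String) :=
  (xs.foldl (fun d p => d.insert p.1 p.2)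
    (PySem.Dict.mk ([] : List (String × List String)))).items

-- classify(items): a frequency count of the converted ids, one filtered pass for one_to_one,
-- and a flatMap over the deduped converted ids (dict.fromkeys = PySem.List.dedup) for many_to_one
def cmtoAltClassify (items : List (String × List String)) :
    List (String × List String) × List (String × List String) :=
  let counts := items.foldl (fun cd p =>
      cd.insert (PySem.List.pyGetD p.2 1 "") (cd.getD (PySem.List.pyGetD p.2 1 "") 0 + 1))
    (PySem.Dict.mk ([] : List (String × Int)))
  let one := (items.filter (fun p => counts.getD (PySem.List.pyGetD p.2 1 "") 0 == 1)).map
      (fun p => (p.1, [PySem.List.pyGetD p.2 0 "", PySem.List.pyGetD p.2 1 ""]))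
  let order := PySem.List.dedup (items.map (fun p => PySem.List.pyGetD p.2 1 ""))
  let many := (order.filter (fun cid => decide (1 < counts.getD cid 0))).flatMap
      (fun cid => items.filter (fun p => PySem.List.pyGetD p.2 1 "" == cid))
  (cmtoAltDict one, cmtoAltDict many)

def checkManyToOne_alt (model_types : List String) (to_one : List (String × List (String × List String))) : (List (String × List (String × List String))) × (List (String × List (String × List String))) :=
  -- to_one.get(typ) guarded with [] only to stay total: Pre_ excludes missing types (AttributeError);
  -- the two outer dict comprehensions run over deduped keys, so they are the pair lists themselves
  let pairs := (PySem.List.dedup model_types).map (fun typ =>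
    (typ, cmtoAltClassify ((PySem.Dict.mk to_one).getD typ [])))
  (pairs.map (fun q => (q.1, q.2.1)), pairs.map (fun q => (q.1, q.2.2)))

-- ===== PRECONDITION & SPEC =====
-- Pre_ excludes (a) inputs where some model type is missing from to_one or some id list is shorter
-- than 2 — there the Python A raises (AttributeError / IndexError) — and (b) association lists whose
-- inner key lists carry duplicate ids: those do not represent any Python dict (a dict literal
-- collapses them), so the behaviour of the list representation there is accidental.
def Pre_checkManyToOne (model_types : List String) (to_one : List (String × List (String × List String))) : Prop :=
  (model_types.all (fun typ =>
    ((PySem.Dict.mk to_one).get? typ).elim false (fun l =>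
      decide ((l.map Prod.fst).Nodup) && l.all (fun p => decide (2 ≤ p.2.length))))) = true
instance (model_types : List String) (to_one : List (String × List (String × List String))) : Decidable (Pre_checkManyToOne model_types to_one) := by unfold Pre_checkManyToOne; infer_instance

def pvWitness_checkManyToOne : List String × (List (String × List (String × List String))) :=
  (["gene"], [("gene", [("a", ["x", "c"]), ("b", ["y", "c"]), ("e", ["z", "w"])])])

def Spec_checkManyToOne (model_types : List String) (to_one : List (String × List (String × List String))) (out : (List (String × List (String × List String))) × (List (String × List (String × List String)))) : Prop := out = checkManyToOne_alt model_types to_one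
instance (model_types : List String) (to_one : List (String × List (String × List String))) (out : (List (String × List (String × List String))) × (List (String × List (String × List String)))) : Decidable (Spec_checkManyToOne model_types to_one out) := by unfold Spec_checkManyToOne; infer_instance

-- ===== CLAIM (what is proved, stated in full; the proofs are below) =====
def Claim_equal_checkManyToOne : Prop := ∀ (model_types : List String) (to_one : List (String × List (String × List String))), Dom_checkManyToOne model_types to_one → Pre_checkManyToOne model_types to_one → Spec_checkManyToOne model_types to_one (checkManyToOne model_types to_one)

-- ===== LEMMAS AND PROOFS =====

-- v[1], the converted id of an item
def cmtoConv (p : String × List String) : String := PySem.List.pyGetD p.2 1 ""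
-- the original ids mapped to converted id c (A's reversed_to_one group)
def cmtoGrp (l : List (String × List String)) (c : String) : List String :=
  (l.filter (fun p => cmtoConv p == c)).map Prod.fst
-- the association list to_one.get(typ) ([] only off Pre_)
def cmtoL (to_one : List (String × List (String × List String))) (typ : String) :
    List (String × List String) := (PySem.Dict.mk to_one).getD typ []
-- A's reversed_to_one for one type
def cmtoRev (l : List (String × List String)) : PySem.Dict String (List String) :=
  l.foldl (fun r p => r.modify (cmtoConv p) [] (fun xs => xs ++ [p.1]))
    (l.foldl (fun r p => r.insert (cmtoConv p) []) (PySem.Dict.mk []))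
-- A's per-type one_to_one dict
def cmtoOneA (l : List (String × List String)) : PySem.Dict String (List String) :=
  (cmtoRev l).items.foldl (fun a q =>
    if q.2.length == 1 then
      a.insert (PySem.List.pyGetD q.2 0 "")
        [PySem.List.pyGetD ((PySem.Dict.mk l).getD (PySem.List.pyGetD q.2 0 "") []) 0 "", q.1]
    else a) (PySem.Dict.mk [])
-- A's per-type many_to_one dict (the inner nested loops, projected to the entry at typ)
def cmtoManyA (l : List (String × List String)) : PySem.Dict String (List String) :=
  (cmtoRev l).values.foldl (fun w value =>
    if 1 < value.length then
      value.foldl (fun w' val => w'.insert val ((PySem.Dict.mk l).getD val [])) w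
    else w) (PySem.Dict.mk [])

theorem cmtoDiscardFilter (s : PySem.Set String) (x : String) (p : String → Bool) :
    (PySem.Set.discard s x).filter p = PySem.Set.discard (s.filter p) x := by
  simp [PySem.Set.discard, List.filter_filter, Bool.and_comm]

theorem cmtoDiscardNotMem (s : PySem.Set String) (x : String) (h : x ∉ s) :
    PySem.Set.discard s x = s := by
  unfold PySem.Set.discard
  apply List.filter_eq_self.mpr
  intro y hy
  simp only [Bool.not_eq_eq_eq_not, Bool.not_true, beq_eq_false_iff_ne, ne_eq]
  exact fun e => h (e ▸ hy)

theorem cmtoOfListFilter (p : String → Bool) (xs : List String) :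
    (PySem.Set.ofList xs).filter p = PySem.Set.ofList (xs.filter p) := by
  induction xs with
  | nil => rfl
  | cons a t ih =>
    rw [PySem.Set.ofList_cons]
    by_cases hp : p a = true
    · rw [List.filter_cons_of_pos hp, cmtoDiscardFilter, ih, List.filter_cons_of_pos hp,
        PySem.Set.ofList_cons]
    · rw [List.filter_cons_of_neg (by simpa using hp), cmtoDiscardFilter, ih,
        List.filter_cons_of_neg (by simpa using hp), cmtoDiscardNotMem]
      intro hmem
      rw [PySem.Set.mem_ofList] at hmem
      exact (by simpa using hp : ¬ p a = true) (List.of_mem_filter hmem)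

theorem cmtoUpdateSubset (s : PySem.Set String) (l : List String) (h : ∀ x ∈ l, x ∈ s) :
    PySem.Set.update s l = s := by
  induction l generalizing s with
  | nil => rfl
  | cons a t ih =>
    have hadd : PySem.Set.add s a = s := by
      simp [PySem.Set.add, PySem.Set.contains]
      exact h a (by simp)
    simp only [PySem.Set.update, List.foldl_cons]
    have := ih (PySem.Set.add s a) (by rw [hadd]; exact fun x hx => h x (List.mem_cons_of_mem _ hx))
    simp only [PySem.Set.update] at this
    rw [this, hadd]

-- outer lookup commutes with wrapping the inner association lists as dicts
theorem cmtoGetMap (xs : List (String × List (String × List String))) (t : String) :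
    (PySem.Dict.mk (xs.map (fun p => (p.1, PySem.Dict.mk p.2)))).get? t
      = ((PySem.Dict.mk xs).get? t).map (fun l => PySem.Dict.mk l) := by
  induction xs with
  | nil => rfl
  | cons a rest ih =>
    simp only [List.map_cons]
    rw [PySem.Dict.get?_mk_cons, PySem.Dict.get?_mk_cons]
    split <;> simp [ih]

-- A's dict-of-dicts lookup is the wrapped association-list lookup (both default to the empty dict)
theorem cmtoGetWrap (to_one : List (String × List (String × List String))) (t : String) :
    (PySem.Dict.mk (to_one.map (fun p => (p.1, PySem.Dict.mk p.2)))).getD t (PySem.Dict.mk [])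
      = PySem.Dict.mk (cmtoL to_one t) := by
  rw [PySem.Dict.getD_eq_get?_getD, cmtoGetMap, cmtoL, PySem.Dict.getD_eq_get?_getD]
  cases (PySem.Dict.mk to_one).get? t <;> rfl

-- a loop that only updates the entry at key t is an update of that entry
theorem cmtoFoldInsertAt {V β : Type} (l : List β) (g : V → β → V) (st : PySem.Dict String V)
    (t : String) (v e : V) :
    l.foldl (fun m b => m.insert t (g (m.getD t e) b)) (st.insert t v)
      = st.insert t (l.foldl g v) := by
  induction l generalizing st v with
  | nil => rfl
  | cons b rest ih =>
    simp only [List.foldl_cons, PySem.Dict.getD_insert_self, PySem.Dict.insert_insert_self]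
    exact ih st (g v b)

-- A's nested many_to_one loops update only the entry at key typ
theorem cmtoFoldManyAt (vals : List (List String)) (d : PySem.Dict String (List String))
    (st : PySem.Dict String (PySem.Dict String (List String))) (t : String)
    (w : PySem.Dict String (List String)) :
    vals.foldl (fun m value =>
        if 1 < value.length then
          value.foldl (fun m' val =>
            m'.insert t ((m'.getD t (PySem.Dict.mk [])).insert val (d.getD val []))) m
        else m) (st.insert t w)
      = st.insert t (vals.foldl (fun w' value =>
          if 1 < value.length then
            value.foldl (fun w'' val => w''.insert val (d.getD val [])) w'
          else w') w) := by
  induction vals generalizing w with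
  | nil => rfl
  | cons value rest ih =>
    simp only [List.foldl_cons]
    by_cases hlen : 1 < value.length
    · simp only [if_pos hlen]
      rw [cmtoFoldInsertAt value (fun w'' val => w''.insert val (d.getD val [])) st t w
        (PySem.Dict.mk [])]
      exact ih _
    · simp only [if_neg hlen]
      exact ih w

-- a fold inserting [] at every key keeps every entry at []
theorem cmtoGetDFoldNil (cs : List String) (d0 : PySem.Dict String (List String))
    (h : ∀ c, d0.getD c [] = []) (c : String) :
    (cs.foldl (fun r x => r.insert x ([] : List String)) d0).getD c [] = [] := by
  induction cs generalizing d0 with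
  | nil => exact h c
  | cons a rest ih =>
    simp only [List.foldl_cons]
    apply ih
    intro c'
    rw [PySem.Dict.getD_insert]
    split
    · rfl
    · exact h c'

theorem cmtoCountOneFilter {α : Type} [DecidableEq α] (l : List α) (q : α → Bool) (p : α)
    (hc : l.countP q = 1) (hp : p ∈ l) (hq : q p = true) : l.filter q = [p] := by
  have hlen : (l.filter q).length = 1 := by rw [← List.countP_eq_length_filter]; exact hc
  obtain ⟨a, ha⟩ := List.length_eq_one_iff.mp hlen
  have hmem : p ∈ l.filter q := List.mem_filter.mpr ⟨hp, hq⟩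
  rw [ha] at hmem ⊢
  simp only [List.mem_singleton] at hmem
  rw [hmem]

-- B's counts dict holds the multiplicity of each converted id
theorem cmtoCountsGetD (l : List (String × List String)) (cid : String) :
    (l.foldl (fun cd p' => cd.insert (cmtoConv p') (cd.getD (cmtoConv p') 0 + 1))
        (PySem.Dict.mk ([] : List (String × Int)))).getD cid 0
      = ((l.map cmtoConv).count cid : Int) := by
  rw [show (List.foldl (fun cd p' => cd.insert (cmtoConv p') (cd.getD (cmtoConv p') 0 + 1))
      (PySem.Dict.mk ([] : List (String × Int))) l)
    = List.foldl (fun cd x => cd.insert x (cd.getD x 0 + 1))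
      (PySem.Dict.mk ([] : List (String × Int))) (l.map cmtoConv) from
    (List.foldl_map (f := cmtoConv)
      (g := fun (cd : PySem.Dict String Int) x => cd.insert x (cd.getD x 0 + 1))
      (l := l) (init := PySem.Dict.mk [])).symm,
    PySem.Dict.getD_foldl_insert_add_one,
    show ({ items := [] } : PySem.Dict String Int).getD cid 0 = 0 from rfl, zero_add]

-- each group has as many members as its converted id has occurrences
theorem cmtoGrpLen (l : List (String × List String)) (c : String) :
    (cmtoGrp l c).length = (l.map cmtoConv).count c := by
  rw [cmtoGrp, List.length_map, ← List.countP_eq_length_filter, List.count, List.countP_map]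
  rfl

-- characterization of A's reversed_to_one
theorem cmtoRevItems (l : List (String × List String)) :
    (cmtoRev l).items
      = (PySem.Set.ofList (l.map cmtoConv)).map (fun c => (c, cmtoGrp l c)) := by
  rw [cmtoRev]
  set rev0 := l.foldl (fun r p => r.insert (cmtoConv p) []) (PySem.Dict.mk []) with hrev0
  set rev := l.foldl (fun r p => r.modify (cmtoConv p) [] (fun xs => xs ++ [p.1])) rev0 with hrev
  have hkeys0 : rev0.keys = PySem.Set.ofList (l.map cmtoConv) := by
    rw [hrev0, PySem.Dict.keys_foldl_insert_key l cmtoConv (fun _ _ => [])]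
    rw [PySem.Set.ofList_eq_foldl]
    rfl
  have hkeys : rev.keys = PySem.Set.ofList (l.map cmtoConv) := by
    rw [hrev, PySem.Dict.keys_foldl_modify_key l cmtoConv [] (fun _ p xs => xs ++ [p.1]), hkeys0]
    exact cmtoUpdateSubset _ _ (fun x hx => (PySem.Set.mem_ofList _ _).mpr hx)
  have hnodk : rev.keys.Nodup := by rw [hkeys]; exact PySem.Set.nodup_ofList _
  have e1 : rev0 = List.foldl (fun (r : PySem.Dict String (List String)) x => r.insert x [])
      (PySem.Dict.mk []) (l.map cmtoConv) :=
    (List.foldl_map (f := cmtoConv)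
      (g := fun (r : PySem.Dict String (List String)) x => r.insert x [])
      (l := l) (init := PySem.Dict.mk [])).symm
  have e2 : rev = List.foldl (fun (r : PySem.Dict String (List String)) (q : String × String) =>
        r.modify q.1 [] (fun xs => xs ++ [q.2])) rev0 (l.map (fun p => (cmtoConv p, p.1))) :=
    (List.foldl_map (f := fun p => (cmtoConv p, p.1))
      (g := fun (r : PySem.Dict String (List String)) (q : String × String) =>
        r.modify q.1 [] (fun xs => xs ++ [q.2]))
      (l := l) (init := rev0)).symm
  have hget0 : ∀ c, rev0.getD c [] = [] := by
    intro c
    rw [e1]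
    exact cmtoGetDFoldNil _ _ (fun _ => rfl) c
  have hget : ∀ c, rev.getD c [] = cmtoGrp l c := by
    intro c
    rw [e2, PySem.Dict.getD_foldl_modify_append, hget0, List.filter_map,
      List.map_map, List.nil_append]
    rfl
  rw [PySem.Dict.items_eq_map_keys rev hnodk [], hkeys]
  exact List.map_congr_left (fun c _ => by rw [hget c])

-- A's per-type one_to_one dict equals B's one-pass pair list folded into a dict
theorem cmtoOneCore (l : List (String × List String)) (hnd : (l.map Prod.fst).Nodup) :
    cmtoOneA l
      = ((l.filter (fun p => (l.map cmtoConv).count (cmtoConv p) == 1)).map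
          (fun p => (p.1, [PySem.List.pyGetD p.2 0 "", cmtoConv p]))).foldl
            (fun d q => d.insert q.1 q.2) (PySem.Dict.mk []) := by
  have hpredA : (fun c => (cmtoGrp l c).length == 1)
      = (fun c => (l.map cmtoConv).count c == 1) :=
    funext fun c => by rw [cmtoGrpLen]
  have hnodupf : ((l.map cmtoConv).filter (fun c => (l.map cmtoConv).count c == 1)).Nodup := by
    rw [List.nodup_iff_count_le_one]
    intro a
    by_cases ha : ((l.map cmtoConv).count a == 1) = true
    · rw [List.count_filter (p := fun c => (l.map cmtoConv).count c == 1)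
        (a := a) (l := l.map cmtoConv) ha]
      exact Nat.le_of_eq (by simpa using ha)
    · rw [List.count_eq_zero_of_not_mem
        (fun hmem : a ∈ (l.map cmtoConv).filter (fun c => (l.map cmtoConv).count c == 1) =>
          ha (List.of_mem_filter (p := fun c => (l.map cmtoConv).count c == 1) hmem))]
      omega
  rw [cmtoOneA, cmtoRevItems, List.foldl_map, List.foldl_map]
  simp only [PySem.List.foldl_if_eq_foldl_filter]
  rw [hpredA, cmtoOfListFilter, PySem.Set.ofList_eq_self_of_nodup _ hnodupf,
    List.filter_map, List.foldl_map]
  apply PySem.List.foldl_congr_mem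
  intro acc p hp
  obtain ⟨hpl, hpc⟩ := List.mem_filter.mp hp
  have hc1 : (l.map cmtoConv).count (cmtoConv p) = 1 := by simpa using hpc
  have hfil : l.filter (fun q => cmtoConv q == cmtoConv p) = [p] := by
    apply cmtoCountOneFilter l _ p _ hpl (by simp)
    rw [← hc1, List.count, List.countP_map]
    rfl
  have hgrp : cmtoGrp l (cmtoConv p) = [p.1] := by rw [cmtoGrp, hfil]; rfl
  rw [hgrp, show PySem.List.pyGetD [p.1] 0 "" = p.1 from by simp [PySem.List.pyGetD],
    PySem.Dict.getD_of_mem_items (PySem.Dict.mk l) (k := p.1) (v := p.2) hpl hnd []]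

-- A's per-type many_to_one dict equals B's grouped pair list folded into a dict
theorem cmtoManyCore (l : List (String × List String)) (hnd : (l.map Prod.fst).Nodup) :
    cmtoManyA l
      = (((PySem.Set.ofList (l.map cmtoConv)).filter
            (fun cid => decide (1 < ((l.map cmtoConv).count cid : Int)))).flatMap
          (fun cid => l.filter (fun p => cmtoConv p == cid))).foldl
            (fun d q => d.insert q.1 q.2) (PySem.Dict.mk []) := by
  rw [List.foldl_flatMap, cmtoManyA,
    show (cmtoRev l).values = (cmtoRev l).items.map Prod.snd from rfl, cmtoRevItems,
    List.map_map,
    show Prod.snd ∘ (fun c => (c, cmtoGrp l c)) = cmtoGrp l from rfl]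
  rw [List.foldl_map, ← PySem.List.foldl_if_eq_foldl_filter]
  apply PySem.List.foldl_congr_mem
  intro acc c hc
  have hlen := cmtoGrpLen l c
  by_cases h1 : 1 < (l.map cmtoConv).count c
  · rw [if_pos (by show 1 < (cmtoGrp l c).length; rw [hlen]; exact h1),
      if_pos (by simpa using (by exact_mod_cast h1 : (1:Int) < ((l.map cmtoConv).count c : Int)))]
    rw [cmtoGrp, List.foldl_map]
    apply PySem.List.foldl_congr_mem
    intro acc' p hp
    have hpl : p ∈ l := List.mem_of_mem_filter hp
    rw [PySem.Dict.getD_of_mem_items (PySem.Dict.mk l) (k := p.1) (v := p.2) hpl hnd []]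
  · rw [if_neg (by show ¬ 1 < (cmtoGrp l c).length; rw [hlen]; exact h1),
      if_neg (by
        simp only [decide_eq_true_eq]
        exact fun hh => h1 (by exact_mod_cast hh))]

-- the fold of A's body is the pair of two independent keyed-insert folds
theorem cmtoPairFold (l : List String)
    (F G : String → PySem.Dict String (List String))
    (st : PySem.Dict String (PySem.Dict String (List String)) ×
          PySem.Dict String (PySem.Dict String (List String))) :
    l.foldl (fun st t => (st.1.insert t (F t), st.2.insert t (G t))) st
      = (l.foldl (fun d t => d.insert t (F t)) st.1,
         l.foldl (fun d t => d.insert t (G t)) st.2) := by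
  induction l generalizing st with
  | nil => rfl
  | cons a rest ih => exact ih _

-- an untouched key keeps its entry through a keyed-insert fold
theorem cmtoGetDFoldKeyNot {ν : Type} (F : String → ν) (l : List String)
    (d : PySem.Dict String ν) (t : String) (d0 : ν) (h : t ∉ l) :
    (l.foldl (fun d x => d.insert x (F x)) d).getD t d0 = d.getD t d0 := by
  induction l generalizing d with
  | nil => rfl
  | cons a rest ih =>
    simp only [List.foldl_cons]
    have hne : ¬ t = a := by rintro rfl; exact h (List.mem_cons_self ..)
    rw [ih _ (fun hm => h (List.mem_cons_of_mem _ hm)), PySem.Dict.getD_insert, if_neg hne]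

-- a keyed-insert fold stores F t at every key t of the list
theorem cmtoGetDFoldKey {ν : Type} (F : String → ν) (l : List String)
    (d : PySem.Dict String ν) (t : String) (d0 : ν) (h : t ∈ l) :
    (l.foldl (fun d x => d.insert x (F x)) d).getD t d0 = F t := by
  induction l generalizing d with
  | nil => exact absurd h (List.not_mem_nil)
  | cons a rest ih =>
    simp only [List.foldl_cons]
    by_cases hr : t ∈ rest
    · exact ih _ hr
    · have ht : t = a := by cases List.mem_cons.mp h with
        | inl e => exact e
        | inr m => exact absurd m hr
      rw [cmtoGetDFoldKeyNot _ _ _ _ _ hr, ht, PySem.Dict.getD_insert_self]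

-- the items of a keyed-insert fold are the deduped keys paired with their values
theorem cmtoItemsFoldKey {ν : Type} (F : String → ν) (l : List String) (d0 : ν) :
    (l.foldl (fun d x => d.insert x (F x)) (PySem.Dict.mk [])).items
      = (PySem.List.dedup l).map (fun t => (t, F t)) := by
  have hkeys : (l.foldl (fun d x => d.insert x (F x)) (PySem.Dict.mk ([] : List (String × ν)))).keys
      = PySem.Set.ofList l := by
    rw [PySem.Dict.keys_foldl_insert]
    rw [PySem.Set.ofList_eq_foldl]
    rfl
  rw [PySem.Dict.items_eq_map_keys _ (by rw [hkeys]; exact PySem.Set.nodup_ofList _) d0, hkeys,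
    PySem.List.dedup_eq_ofList]
  exact List.map_congr_left (fun t ht =>
    by rw [cmtoGetDFoldKey F l _ t d0 ((PySem.Set.mem_ofList _ _).mp ht)])

-- A's per-type loop body, named (definitionally A's step; proofs rewrite it)
def cmtoStepA (to_one : List (String × List (String × List String)))
    (st : PySem.Dict String (PySem.Dict String (List String)) ×
          PySem.Dict String (PySem.Dict String (List String))) (typ : String) :
    PySem.Dict String (PySem.Dict String (List String)) ×
    PySem.Dict String (PySem.Dict String (List String)) :=
  let d := (PySem.Dict.mk (to_one.map (fun p => (p.1, PySem.Dict.mk p.2)))).getD typ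
    (PySem.Dict.mk [])
  let rev0 := d.values.foldl (fun r bigg => r.insert (PySem.List.pyGetD bigg 1 "") [])
    (PySem.Dict.mk ([] : List (String × List String)))
  let rev := d.items.foldl
    (fun r p => r.modify (PySem.List.pyGetD p.2 1 "") [] (fun xs => xs ++ [p.1])) rev0
  let one := st.1.insert typ (rev.items.foldl (fun a q =>
      if q.2.length == 1 then
        a.insert (PySem.List.pyGetD q.2 0 "")
          [PySem.List.pyGetD (d.getD (PySem.List.pyGetD q.2 0 "") []) 0 "", q.1]
      else a) (PySem.Dict.mk []))
  let many := rev.values.foldl (fun m value =>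
      if 1 < value.length then
        value.foldl (fun m' val =>
          m'.insert typ ((m'.getD typ (PySem.Dict.mk [])).insert val (d.getD val []))) m
      else m) (st.2.insert typ (PySem.Dict.mk []))
  (one, many)

-- A's step only updates the two entries at key typ
theorem cmtoStepEq (to_one : List (String × List (String × List String)))
    (st : PySem.Dict String (PySem.Dict String (List String)) ×
          PySem.Dict String (PySem.Dict String (List String))) (typ : String) :
    cmtoStepA to_one st typ
      = (st.1.insert typ (cmtoOneA (cmtoL to_one typ)),
         st.2.insert typ (cmtoManyA (cmtoL to_one typ))) := by
  unfold cmtoStepA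
  simp only
  rw [cmtoGetWrap]
  have hrev0 : (PySem.Dict.mk (cmtoL to_one typ)).values.foldl
      (fun r bigg => r.insert (PySem.List.pyGetD bigg 1 "") [])
      (PySem.Dict.mk ([] : List (String × List String)))
    = (cmtoL to_one typ).foldl (fun r p => r.insert (cmtoConv p) []) (PySem.Dict.mk []) :=
    List.foldl_map (f := Prod.snd)
      (g := fun (r : PySem.Dict String (List String)) v =>
        r.insert (PySem.List.pyGetD v 1 "") [])
      (l := cmtoL to_one typ) (init := PySem.Dict.mk [])
  rw [hrev0]
  rw [show (PySem.Dict.mk (cmtoL to_one typ)).items = cmtoL to_one typ from rfl]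
  rw [show (fun (r : PySem.Dict String (List String)) (p : String × List String) =>
      r.modify (PySem.List.pyGetD p.2 1 "") [] (fun xs => xs ++ [p.1]))
    = (fun r p => r.modify (cmtoConv p) [] (fun xs => xs ++ [p.1])) from rfl]
  rw [show (cmtoL to_one typ).foldl
      (fun r p => r.modify (cmtoConv p) [] (fun xs => xs ++ [p.1]))
      ((cmtoL to_one typ).foldl (fun r p => r.insert (cmtoConv p) []) (PySem.Dict.mk []))
    = cmtoRev (cmtoL to_one typ) from rfl]
  rw [cmtoFoldManyAt]
  rfl

-- A's whole computation as two keyed-insert folds over model_types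
theorem cmtoAUnfold (model_types : List String)
    (to_one : List (String × List (String × List String))) :
    checkManyToOne model_types to_one
      = (((PySem.List.dedup model_types).map
            (fun t => (t, (cmtoOneA (cmtoL to_one t)).items))),
         ((PySem.List.dedup model_types).map
            (fun t => (t, (cmtoManyA (cmtoL to_one t)).items)))) := by
  have h0 : checkManyToOne model_types to_one
      = ((model_types.foldl (cmtoStepA to_one) (PySem.Dict.mk [], PySem.Dict.mk [])).1.items.map
          (fun p => (p.1, p.2.items)),
         (model_types.foldl (cmtoStepA to_one) (PySem.Dict.mk [], PySem.Dict.mk [])).2.items.map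
          (fun p => (p.1, p.2.items))) := rfl
  rw [h0,
    PySem.List.foldl_congr_mem (l := model_types) (f := cmtoStepA to_one)
      (g := fun st typ => (st.1.insert typ (cmtoOneA (cmtoL to_one typ)),
                           st.2.insert typ (cmtoManyA (cmtoL to_one typ))))
      (init := (PySem.Dict.mk [], PySem.Dict.mk []))
      (fun st typ _ => cmtoStepEq to_one st typ),
    cmtoPairFold model_types (fun t => cmtoOneA (cmtoL to_one t))
      (fun t => cmtoManyA (cmtoL to_one t)) (PySem.Dict.mk [], PySem.Dict.mk []),
    cmtoItemsFoldKey (fun t => cmtoOneA (cmtoL to_one t)) model_types (PySem.Dict.mk []),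
    cmtoItemsFoldKey (fun t => cmtoManyA (cmtoL to_one t)) model_types (PySem.Dict.mk [])]
  simp only [List.map_map]
  rfl

-- ===== VERDICT (by name: the statement is the Claim_ definition above) =====
theorem checkManyToOne_spec : Claim_equal_checkManyToOne := by
  intro model_types to_one hdom hpre
  show checkManyToOne model_types to_one = checkManyToOne_alt model_types to_one
  rw [cmtoAUnfold]
  unfold checkManyToOne_alt
  simp only [List.map_map]
  simp only [Pre_checkManyToOne, List.all_eq_true] at hpre
  have hper : ∀ t ∈ PySem.List.dedup model_types,
      (cmtoOneA (cmtoL to_one t)).items = (cmtoAltClassify (cmtoL to_one t)).1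
      ∧ (cmtoManyA (cmtoL to_one t)).items = (cmtoAltClassify (cmtoL to_one t)).2 := by
    intro t ht
    have htm : t ∈ model_types := (PySem.List.mem_dedup _ _).mp ht
    have h1 := hpre t htm
    cases heq : (PySem.Dict.mk to_one).get? t with
    | none => rw [heq] at h1; simp at h1
    | some l0 =>
      rw [heq] at h1
      simp only [Option.elim_some, Bool.and_eq_true, decide_eq_true_eq,
        List.all_eq_true] at h1
      have hL : cmtoL to_one t = l0 := by rw [cmtoL, PySem.Dict.getD_eq_get?_getD, heq]; rfl
      rw [hL]
      have hnd := h1.1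
      -- rewrite B's classify into count form
      have hcounts : (fun p : String × List String =>
            ((l0.foldl (fun cd p' =>
              cd.insert (PySem.List.pyGetD p'.2 1 "")
                (cd.getD (PySem.List.pyGetD p'.2 1 "") 0 + 1))
              (PySem.Dict.mk ([] : List (String × Int)))).getD
                (PySem.List.pyGetD p.2 1 "") 0 == 1))
          = (fun p : String × List String => (l0.map cmtoConv).count (cmtoConv p) == 1) := by
        funext p
        rw [show (fun (cd : PySem.Dict String Int) (p' : String × List String) =>
            cd.insert (PySem.List.pyGetD p'.2 1 "")
              (cd.getD (PySem.List.pyGetD p'.2 1 "") 0 + 1))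
          = (fun cd p' => cd.insert (cmtoConv p') (cd.getD (cmtoConv p') 0 + 1)) from rfl,
          cmtoCountsGetD]
        simp [cmtoConv]
      have hcounts2 : (fun cid : String =>
            decide (1 < (l0.foldl (fun cd p' =>
              cd.insert (PySem.List.pyGetD p'.2 1 "")
                (cd.getD (PySem.List.pyGetD p'.2 1 "") 0 + 1))
              (PySem.Dict.mk ([] : List (String × Int)))).getD cid 0))
          = (fun cid : String => decide (1 < ((l0.map cmtoConv).count cid : Int))) := by
        funext cid
        rw [show (fun (cd : PySem.Dict String Int) (p' : String × List String) =>
            cd.insert (PySem.List.pyGetD p'.2 1 "")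
              (cd.getD (PySem.List.pyGetD p'.2 1 "") 0 + 1))
          = (fun cd p' => cd.insert (cmtoConv p') (cd.getD (cmtoConv p') 0 + 1)) from rfl,
          cmtoCountsGetD]
      constructor
      · rw [cmtoOneCore l0 hnd, cmtoAltClassify, cmtoAltDict]
        simp only
        rw [hcounts]
        rfl
      · rw [cmtoManyCore l0 hnd, cmtoAltClassify, cmtoAltDict]
        simp only
        rw [hcounts2, PySem.List.dedup_eq_ofList,
          show l0.map (fun p => PySem.List.pyGetD p.2 1 "") = l0.map cmtoConv from rfl]
        rfl
  refine Prod.ext ?_ ?_ <;> simp only <;>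
    exact List.map_congr_left (fun t ht => by
      have h := hper t ht
      simp only [h.1, h.2]
      rfl)
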